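-- pv_equiv track=rewrite | github.com/milairhu/helltaker_solver | SAT/SAT_Helltaker.py | cell_to_variable
-- ===== SOURCE A (Python) =====
-- def cell_to_variable(i: int, j: int, val: int, nbCoupsCherche : int, nbCoupsInit : int, largeur:int, hauteur : int) -> int: #verifier, mais me parait corrrect
--     #les nb*4 premieres variables sont pour donner la direction choisie par coup : nbG, nbD, nbH, nbB
--
--     if i<0 or j<0 or j>=largeur or i>=hauteur :
--         return 0
--
--     res = 4*nbCoupsInit
--     for a in range(0, i): #pour chaque ligne
--         for b in range(0, largeur): #pour chaque colonne
--             for z in range(0, 9+1+1): #pour chaque valeur possible (cf code)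
--                 for c in range(0,nbCoupsInit+1):
--                     res = res + 1
--     # on est mtn à la bonne ligne
--     for b in range(0, j):
--         for z in range(0, 9+1+1):
--             for c in range(0,nbCoupsInit+1):
--                 res = res + 1
--
--     # on est bonne ligne + bonne colonne = bonne case
--     for z in range(0, val):
--         for c in range(0,nbCoupsInit+1):
--             res = res + 1
--     # on est maintenant à la bonne valeur de la case. On prend le numero de coup cherché correspondant
--     for c in range(0,nbCoupsCherche+1):
--         res=res+1
--
--     return res
-- ===== SOURCE B (Python) =====
-- def cell_to_variable(i: int, j: int, val: int, nbCoupsCherche: int, nbCoupsInit: int, largeur: int, hauteur: int) -> int: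
--     if i < 0 or j < 0 or j >= largeur or i >= hauteur:
--         return 0
--     per_val = max(nbCoupsInit + 1, 0)      # = len(range(0, nbCoupsInit + 1))
--     per_cell = 11 * per_val                # 11 possible values per cell
--     return (4 * nbCoupsInit
--             + (i * largeur + j) * per_cell
--             + max(val, 0) * per_val
--             + max(nbCoupsCherche + 1, 0))
-- ===== Notes on version B (the rewrite author's own statement) =====
-- stated objective: simpler
-- what changed: Replaced the four nested counting loops by the closed-form arithmetic sum of their iteration counts (max(n,0) being exactly the length of range(0,n)).
import Mathlib
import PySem

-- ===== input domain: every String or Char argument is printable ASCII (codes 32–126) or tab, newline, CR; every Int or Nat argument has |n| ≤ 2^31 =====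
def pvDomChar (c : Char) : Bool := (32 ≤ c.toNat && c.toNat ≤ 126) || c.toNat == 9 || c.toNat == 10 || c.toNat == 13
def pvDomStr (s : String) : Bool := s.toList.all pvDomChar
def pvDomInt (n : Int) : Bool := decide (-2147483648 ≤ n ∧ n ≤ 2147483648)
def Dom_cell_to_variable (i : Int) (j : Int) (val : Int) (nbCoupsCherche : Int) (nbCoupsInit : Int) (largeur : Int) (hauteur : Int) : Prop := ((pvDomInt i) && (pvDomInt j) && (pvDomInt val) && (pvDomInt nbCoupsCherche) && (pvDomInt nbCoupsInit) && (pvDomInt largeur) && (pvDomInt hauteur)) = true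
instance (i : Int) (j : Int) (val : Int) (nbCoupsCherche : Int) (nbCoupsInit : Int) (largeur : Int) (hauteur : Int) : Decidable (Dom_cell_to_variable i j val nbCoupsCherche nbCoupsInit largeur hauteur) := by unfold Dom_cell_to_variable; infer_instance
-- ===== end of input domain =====

-- B replaces A's four nested counting loops by the closed-form sum of their iteration
-- counts (max(n,0) = len(range(0,n))); objective: simpler.

-- ===== PORT A =====
def cell_to_variable (i : Int) (j : Int) (val : Int) (nbCoupsCherche : Int) (nbCoupsInit : Int) (largeur : Int) (hauteur : Int) : Int :=
  if i < 0 ∨ j < 0 ∨ largeur ≤ j ∨ hauteur ≤ i then 0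
  else
    let res := 4 * nbCoupsInit
    let res := (PySem.List.pyRange 0 i 1).foldl (fun r _ =>
      (PySem.List.pyRange 0 largeur 1).foldl (fun r _ =>
        (PySem.List.pyRange 0 (9 + 1 + 1) 1).foldl (fun r _ =>
          (PySem.List.pyRange 0 (nbCoupsInit + 1) 1).foldl (fun r _ => r + 1) r) r) r) res
    let res := (PySem.List.pyRange 0 j 1).foldl (fun r _ =>
      (PySem.List.pyRange 0 (9 + 1 + 1) 1).foldl (fun r _ =>
        (PySem.List.pyRange 0 (nbCoupsInit + 1) 1).foldl (fun r _ => r + 1) r) r) res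
    let res := (PySem.List.pyRange 0 val 1).foldl (fun r _ =>
      (PySem.List.pyRange 0 (nbCoupsInit + 1) 1).foldl (fun r _ => r + 1) r) res
    let res := (PySem.List.pyRange 0 (nbCoupsCherche + 1) 1).foldl (fun r _ => r + 1) res
    res

-- ===== PORT B =====
def cell_to_variable_alt (i : Int) (j : Int) (val : Int) (nbCoupsCherche : Int) (nbCoupsInit : Int) (largeur : Int) (hauteur : Int) : Int :=
  if i < 0 ∨ j < 0 ∨ largeur ≤ j ∨ hauteur ≤ i then 0
  else
    let perVal := max (nbCoupsInit + 1) 0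
    let perCell := 11 * perVal
    4 * nbCoupsInit + (i * largeur + j) * perCell + (max val 0) * perVal
      + max (nbCoupsCherche + 1) 0

-- ===== PRECONDITION & SPEC =====
def Spec_cell_to_variable (i : Int) (j : Int) (val : Int) (nbCoupsCherche : Int) (nbCoupsInit : Int) (largeur : Int) (hauteur : Int) (out : Int) : Prop := out = cell_to_variable_alt i j val nbCoupsCherche nbCoupsInit largeur hauteur
instance (i : Int) (j : Int) (val : Int) (nbCoupsCherche : Int) (nbCoupsInit : Int) (largeur : Int) (hauteur : Int) (out : Int) : Decidable (Spec_cell_to_variable i j val nbCoupsCherche nbCoupsInit largeur hauteur out) := by unfold Spec_cell_to_variable; infer_instance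

-- ===== CLAIM (what is proved, stated in full; the proofs are below) =====
def Claim_equal_cell_to_variable : Prop := ∀ (i : Int) (j : Int) (val : Int) (nbCoupsCherche : Int) (nbCoupsInit : Int) (largeur : Int) (hauteur : Int), Dom_cell_to_variable i j val nbCoupsCherche nbCoupsInit largeur hauteur → Spec_cell_to_variable i j val nbCoupsCherche nbCoupsInit largeur hauteur (cell_to_variable i j val nbCoupsCherche nbCoupsInit largeur hauteur)

-- ===== LEMMAS AND PROOFS =====

/-- A loop that adds the constant `k` once per element adds `k * length` in total. -/
theorem foldl_add_const {α : Type} (k : Int) (l : List α) (r : Int) :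
    l.foldl (fun r _ => r + k) r = r + k * l.length := by
  induction l generalizing r with
  | nil => simp
  | cons a t ih => simp [List.foldl, ih]; ring

/-- Iteration count of `range(0,n)` as an `Int` is `max n 0`. -/
theorem length_pyRange_zero_int (n : Int) :
    ((PySem.List.pyRange 0 n 1).length : Int) = max n 0 := by
  rw [PySem.List.length_pyRange_one]; omega

theorem cell_to_variable_eq_alt (i j val nbCoupsCherche nbCoupsInit largeur hauteur : Int) :
    cell_to_variable i j val nbCoupsCherche nbCoupsInit largeur hauteur
      = cell_to_variable_alt i j val nbCoupsCherche nbCoupsInit largeur hauteur := by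
  unfold cell_to_variable cell_to_variable_alt
  split
  · rfl
  · rename_i h
    push Not at h
    obtain ⟨hi, hj, hjl, hih⟩ := h
    simp only [foldl_add_const, length_pyRange_zero_int]
    have hmi : max i 0 = i := by omega
    have hmj : max j 0 = j := by omega
    have hml : max largeur 0 = largeur := by omega
    rw [hmi, hmj, hml]
    norm_num
    ring

-- ===== VERDICT (by name: the statement is the Claim_ definition above) =====
theorem cell_to_variable_spec : Claim_equal_cell_to_variable := by
  intro i j val c n l h _
  exact cell_to_variable_eq_alt i j val c n l h
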